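-- pv_equiv track=rewrite | github.com/mariahbf/Backtracking | salao2.py | is_valid_standoff
-- ===== SOURCE A (Python) =====
-- def count_rivals_aimed_at(board, row, col, gang):
--     # Count how many rival gang members the gunman at (row, col) is "aiming" at
--     rival = 'B' if gang == 'C' else 'C'
--     aiming_count = 0
--
--     # Check for rivals in straight lines (left-right, up-down, diagonals)
--     lines = [(-1, 0), (1, 0), (0, -1), (0, 1), (-1, -1), (-1, 1), (1, -1), (1, 1)]
--     for dr, dc in lines:
--         r, c = row + dr, col + dc
--         while 0 <= r < len(board) and 0 <= c < len(board):
--             if board[r][c] == rival: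
--                 aiming_count += 1
--                 break
--             elif board[r][c] != '.':
--                 break  # Blocked by a teammate
--             r, c = r + dr, c + dc
--     return aiming_count
--
-- def is_valid_standoff(board):
--     # Check the entire board to ensure all gunmen are aiming at at least two rivals
--     for row in range(len(board)):
--         for col in range(len(board)):
--             if board[row][col] in ('B', 'C'):
--                 gunman = board[row][col]
--                 if count_rivals_aimed_at(board, row, col, gunman) < 2:
--                     return False
--     return True
-- ===== SOURCE B (Python) =====
-- def is_valid_standoff(board):
--     # Directional DP: one sweep per direction precomputes, for every cell, the
--     # first non-'.' symbol along that direction; then each gunman's rival count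
--     # is read off in O(1) per direction (O(n^2) total vs A's per-cell ray walks).
--     n = len(board)
--     rows = [r[:n] for r in board[:n]]
--
--     def phi(s, m):
--         return s if s != '.' else m
--
--     def sweep_up(b, dc):
--         # grid[r][c] = first non-'.' symbol from (r, c) in direction (-1, dc)
--         cur = ['.'] * n
--         out = []
--         for row in b:
--             out.append(cur)
--             a = [phi(row[c], cur[c]) for c in range(n)]
--             if dc == 1:
--                 cur = a[1:] + ['.']
--             elif dc == -1:
--                 cur = ['.'] + a[:-1]
--             else:
--                 cur = a
--         return out
--
--     def row_left(row):
--         # out[c] = first non-'.' symbol from (·, c) in direction (0, -1)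
--         cur = '.'
--         out = []
--         for s in row:
--             out.append(cur)
--             cur = phi(s, cur)
--         return out
--
--     rev = rows[::-1]
--     grids = [
--         sweep_up(rows, 0), sweep_up(rows, -1), sweep_up(rows, 1),
--         sweep_up(rev, 0)[::-1], sweep_up(rev, -1)[::-1], sweep_up(rev, 1)[::-1],
--         [row_left(r) for r in rows],
--         [row_left(r[::-1])[::-1] for r in rows],
--     ]
--     for r in range(n):
--         for c in range(n):
--             s = rows[r][c]
--             if s in ('B', 'C'):
--                 rival = 'B' if s == 'C' else 'C'
--                 if sum(g[r][c] == rival for g in grids) < 2: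
--                     return False
--     return True
-- ===== Notes on version B (the rewrite author's own statement) =====
-- stated objective: alternative
-- what changed: B replaces A's per-gunman ray walks (8 while-loops per cell) by eight directional DP sweeps that precompute, for every cell, the first non-'.' symbol in each direction, then reads each gunman's rival count off the precomputed grids.
-- outside the precondition, e.g. on is_valid_standoff([['B', 'x', 'x'], ['x', 'x', 'x'], ['x']]): A returns False, B raises IndexError; on is_valid_standoff([['C', 'x', 'x'], ['x', 'x', 'x'], ['x']]): A returns False, B raises IndexError
import Mathlib
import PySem

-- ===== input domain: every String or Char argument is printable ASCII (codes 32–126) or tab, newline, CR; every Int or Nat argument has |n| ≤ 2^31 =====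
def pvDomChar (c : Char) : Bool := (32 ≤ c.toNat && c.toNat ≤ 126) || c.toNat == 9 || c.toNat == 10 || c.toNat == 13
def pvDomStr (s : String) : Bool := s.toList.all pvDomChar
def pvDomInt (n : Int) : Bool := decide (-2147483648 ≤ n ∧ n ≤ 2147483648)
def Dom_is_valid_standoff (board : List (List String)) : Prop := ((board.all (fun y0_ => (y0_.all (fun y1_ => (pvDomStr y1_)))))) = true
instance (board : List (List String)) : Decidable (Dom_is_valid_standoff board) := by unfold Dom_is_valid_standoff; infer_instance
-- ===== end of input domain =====

-- B replaces A's per-gunman 8-direction ray walks by eight directional DP sweeps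
-- precomputing each cell's first non-'.' symbol per direction (alternative algorithm).


-- ===== PORT A =====
-- board[r][c]; A only evaluates it inside 0 ≤ r,c < n bound checks, where Pre_ makes rows long enough
def pvSym (board : List (List String)) (r c : Int) : String :=
  PySem.List.pyGetD (PySem.List.pyGetD board r []) c ""

-- A's inner while loop for one direction (dr, dc): walks from (r, c) and returns the 0/1
-- contribution to aiming_count (1 iff the first non-'.' cell hit is the rival).
-- fuel = n is enough: a walk that starts on the board stays in bounds for < n steps.
def pvScanA (board : List (List String)) (n : Int) (rival : String) (dr dc : Int) :
    Nat → Int → Int → Int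
  | fuel, r, c =>
    if 0 ≤ r ∧ r < n ∧ 0 ≤ c ∧ c < n then
      if pvSym board r c = rival then 1
      else if pvSym board r c ≠ "." then 0
      else
        match fuel with
        | 0 => 0
        | fuel' + 1 => pvScanA board n rival dr dc fuel' (r + dr) (c + dc)
    else 0

def pvCountRivals (board : List (List String)) (n : Int) (row col : Int) (gang : String) : Int :=
  let rival := if gang = "C" then "B" else "C"
  [((-1 : Int), (0 : Int)), (1, 0), (0, -1), (0, 1), (-1, -1), (-1, 1), (1, -1), (1, 1)].foldl
    (fun acc d => acc + pvScanA board n rival d.1 d.2 n.toNat (row + d.1) (col + d.2)) 0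

def is_valid_standoff (board : List (List String)) : Bool :=
  let n : Int := board.length
  (PySem.List.pyRange 0 n 1).all fun row =>
    (PySem.List.pyRange 0 n 1).all fun col =>
      if pvSym board row col = "B" ∨ pvSym board row col = "C" then
        decide (¬ pvCountRivals board n row col (pvSym board row col) < 2)
      else true

-- ===== PORT B =====
def pvPhi (s m : String) : String := if s ≠ "." then s else m

-- a[1:] + ['.']  /  ['.'] + a[:-1]  /  a
def pvShift (dc : Int) (a : List String) : List String :=
  if dc = 1 then a.drop 1 ++ ["."]
  else if dc = -1 then "." :: a.dropLast
  else a

-- one iteration of Source B's sweep_up loop body: build a, then shift it by dc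
def pvSweepStep (n : Nat) (dc : Int) (cur row : List String) : List String :=
  pvShift dc ((List.range n).map fun c => pvPhi (row.getD c "") (cur.getD c "."))

-- Source B sweep_up: grid[r][c] = first non-'.' symbol from (r,c) in direction (-1,dc)
def pvSweepUp (n : Nat) (dc : Int) (b : List (List String)) : List (List String) :=
  (b.foldl (fun (st : List String × List (List String)) row =>
      (pvSweepStep n dc st.1 row, st.2 ++ [st.1]))
    (List.replicate n ".", ([] : List (List String)))).2

-- Source B row_left: out[c] = first non-'.' symbol from (·,c) in direction (0,-1)
def pvRowLeft (row : List String) : List String :=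
  (row.foldl (fun (st : String × List String) s => (pvPhi s st.1, st.2 ++ [st.1]))
    (".", ([] : List String))).2

-- rows = [r[:n] for r in board[:n]]
def pvRows (board : List (List String)) : List (List String) :=
  (board.take board.length).map (fun r => r.take board.length)

def pvGrids (n : Nat) (rows : List (List String)) : List (List (List String)) :=
  let rev := rows.reverse
  [pvSweepUp n 0 rows, pvSweepUp n (-1) rows, pvSweepUp n 1 rows,
   (pvSweepUp n 0 rev).reverse, (pvSweepUp n (-1) rev).reverse, (pvSweepUp n 1 rev).reverse,
   rows.map pvRowLeft,
   rows.map (fun r => (pvRowLeft r.reverse).reverse)]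

def is_valid_standoff_alt (board : List (List String)) : Bool :=
  let n := board.length
  let rows := pvRows board
  let grids := pvGrids n rows
  (List.range n).all fun r =>
    (List.range n).all fun c =>
      if (rows.getD r []).getD c "" = "B" ∨ (rows.getD r []).getD c "" = "C" then
        decide (¬ (grids.foldl
          (fun (acc : Int) g => acc +
            (if (g.getD r []).getD c "." =
                (if (rows.getD r []).getD c "" = "C" then "B" else "C") then 1 else 0))
          0) < 2)
      else true

-- ===== PRECONDITION & SPEC =====
-- Pre_ excludes ragged boards (a row shorter than the board's height): on those A's
-- board[r][c] accesses raise IndexError for most cells (A can only return — always False —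
-- when an early failing gunman is fully processed before any short row is touched).
def Pre_is_valid_standoff (board : List (List String)) : Prop :=
  ∀ r ∈ board, board.length ≤ r.length
instance (board : List (List String)) : Decidable (Pre_is_valid_standoff board) := by
  unfold Pre_is_valid_standoff; infer_instance

def pvWitness_is_valid_standoff : List (List String) := [["B", "C"], ["C", "B"]]

def Spec_is_valid_standoff (board : List (List String)) (out : Bool) : Prop :=
  out = is_valid_standoff_alt board
instance (board : List (List String)) (out : Bool) : Decidable (Spec_is_valid_standoff board out) := by
  unfold Spec_is_valid_standoff; infer_instance

-- ===== CLAIM (what is proved, stated in full; the proofs are below) =====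
def Claim_equal_is_valid_standoff : Prop := ∀ (board : List (List String)), Dom_is_valid_standoff board → Pre_is_valid_standoff board → Spec_is_valid_standoff board (is_valid_standoff board)

-- ===== LEMMAS AND PROOFS =====

-- specification of the "first non-'.' symbol" along an upward ray, by structural recursion
-- on the row index: nxtU R n dc r c = first non-'.' symbol from cell (r, c) in direction (-1, dc)
def nxtU (R : List (List String)) (n : Nat) (dc : Int) : Nat → Int → String
  | 0, _ => "."
  | r + 1, c =>
    if 0 ≤ c + dc ∧ c + dc < (n : Int) then
      if (R.getD r []).getD (c + dc).toNat "" ≠ "." then (R.getD r []).getD (c + dc).toNat ""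
      else nxtU R n dc r (c + dc)
    else "."

-- same for a leftward ray within one row
def nxtL (row : List String) : Nat → String
  | 0 => "."
  | c + 1 => if row.getD c "" ≠ "." then row.getD c "" else nxtL row c

-- recursive description of the rows emitted by Source B's sweep_up loop
def sweepRows (n : Nat) (dc : Int) : List String → List (List String) → List (List String)
  | _, [] => []
  | cur, row :: L => cur :: sweepRows n dc (pvSweepStep n dc cur row) L

-- same for row_left
def rowCells : String → List String → List String
  | _, [] => []
  | cur, s :: t => cur :: rowCells (pvPhi s cur) t

lemma pvAllCongr {α : Type} (l : List α) (p q : α → Bool) (h : ∀ x ∈ l, p x = q x) :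
    l.all p = l.all q := by
  induction l with
  | nil => rfl
  | cons x t ih =>
    simp only [List.all_cons, h x (by simp), ih fun y hy => h y (by simp [hy])]

lemma pvMapGetD {α β : Type} (f : α → β) (l : List α) (i : Nat) (h : i < l.length)
    (d : α) (d' : β) : (l.map f).getD i d' = f (l.getD i d) := by
  rw [List.getD_eq_getElem _ _ (by simpa using h), List.getElem_map, List.getD_eq_getElem _ _ h]

lemma pvRevGetD {α : Type} (l : List α) (n i : Nat) (hl : l.length = n) (hi : i < n)
    (d : α) : l.reverse.getD i d = l.getD (n - 1 - i) d := by
  rw [List.getD_reverse i (by omega), hl]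

lemma pvRows_length (board : List (List String)) : (pvRows board).length = board.length := by
  simp [pvRows]

lemma pvRows_getD (board : List (List String)) (r : Nat) (hr : r < board.length) :
    (pvRows board).getD r [] = (board.getD r []).take board.length := by
  unfold pvRows
  rw [pvMapGetD _ _ r (by simpa using hr) [], List.take_length]

lemma pvRows_row_length (board : List (List String)) (hpre : Pre_is_valid_standoff board)
    (r : Nat) (hr : r < board.length) :
    ((pvRows board).getD r []).length = board.length := by
  rw [pvRows_getD board r hr, List.length_take]
  have hmem : board.getD r [] ∈ board := by
    rw [List.getD_eq_getElem _ _ hr]; exact List.getElem_mem hr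
  have := hpre _ hmem
  omega

lemma pvSym_eq (board : List (List String)) (hpre : Pre_is_valid_standoff board)
    (r c : Nat) (hr : r < board.length) (hc : c < board.length) :
    pvSym board (r : Int) (c : Int) = ((pvRows board).getD r []).getD c "" := by
  unfold pvSym
  rw [PySem.List.pyGetD_eq_getElem board _ (by omega) (by exact_mod_cast hr)]
  simp only [Int.toNat_natCast]
  have hmem : board[r] ∈ board := List.getElem_mem hr
  have hrowlen : board.length ≤ board[r].length := hpre _ hmem
  rw [PySem.List.pyGetD_eq_getElem _ _ (by omega)
    (by exact_mod_cast lt_of_lt_of_le hc hrowlen)]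
  simp only [Int.toNat_natCast]
  rw [pvRows_getD board r hr, List.getD_eq_getElem _ _ hr]
  rw [List.getD_eq_getElem _ _
    (show c < (board[r].take board.length).length by simp [List.length_take]; omega)]
  rw [List.getElem_take]

lemma pvShift_getD (dc : Int) (hdc : dc = 1 ∨ dc = -1 ∨ dc = 0) (n : Nat)
    (a : List String) (ha : a.length = n) (c : Nat) (hc : c < n) :
    (pvShift dc a).getD c "." =
      if 0 ≤ (c : Int) + dc ∧ (c : Int) + dc < (n : Int) then a.getD ((c : Int) + dc).toNat "."
      else "." := by
  have hsingle : ∀ i : Nat, (["."] : List String).getD i "." = "." := by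
    intro i; cases i <;> simp
  rcases hdc with h | h | h <;> subst h
  · -- dc = 1
    unfold pvShift
    rw [if_pos rfl]
    by_cases hn : c + 1 < n
    · have h1 : c < (a.drop 1).length := by simp [ha]; omega
      rw [if_pos (show (0 : Int) ≤ (c : Int) + 1 ∧ (c : Int) + 1 < (n : Int) by omega)]
      rw [show ((c : Int) + 1).toNat = 1 + c from by omega]
      rw [List.getD_append _ _ _ _ h1, List.getD_eq_getElem _ _ h1,
        List.getD_eq_getElem a "." (show 1 + c < a.length from by omega), List.getElem_drop]
    · have h1 : (a.drop 1).length ≤ c := by simp [ha]; omega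
      rw [if_neg (by omega), List.getD_append_right _ _ _ _ h1, hsingle]
  · -- dc = -1
    unfold pvShift
    rw [if_neg (by decide), if_pos rfl]
    cases c with
    | zero => rw [List.getD_cons_zero, if_neg (by omega)]
    | succ k =>
      rw [List.getD_cons_succ, if_pos (show (0 : Int) ≤ ((k + 1 : Nat) : Int) + -1 ∧
        ((k + 1 : Nat) : Int) + -1 < (n : Int) by omega)]
      have hk : k < a.dropLast.length := by simp [ha]; omega
      rw [show (((k + 1 : Nat) : Int) + -1).toNat = k from by omega]
      rw [List.getD_eq_getElem _ _ hk, List.getD_eq_getElem a "." (show k < a.length from by omega),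
        List.getElem_dropLast]
  · -- dc = 0
    unfold pvShift
    rw [if_neg (by decide), if_neg (by decide)]
    rw [if_pos (show (0 : Int) ≤ (c : Int) + 0 ∧ (c : Int) + 0 < (n : Int) by omega)]
    rw [show ((c : Int) + 0).toNat = c from by omega]

lemma pvShift_length (dc : Int) (hdc : dc = 1 ∨ dc = -1 ∨ dc = 0) (n : Nat) (hn : 0 < n)
    (a : List String) (ha : a.length = n) : (pvShift dc a).length = n := by
  rcases hdc with h | h | h <;> subst h <;> simp [pvShift, ha] <;> omega

lemma pvSweepStep_length (n : Nat) (dc : Int) (hdc : dc = 1 ∨ dc = -1 ∨ dc = 0) (hn : 0 < n)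
    (cur row : List String) : (pvSweepStep n dc cur row).length = n := by
  unfold pvSweepStep
  exact pvShift_length dc hdc n hn _ (by simp)

lemma sweep_fold (n : Nat) (dc : Int) :
    ∀ (L : List (List String)) (cur : List String) (acc : List (List String)),
      (L.foldl (fun (st : List String × List (List String)) row =>
        (pvSweepStep n dc st.1 row, st.2 ++ [st.1])) (cur, acc)).2
      = acc ++ sweepRows n dc cur L := by
  intro L
  induction L with
  | nil => intro cur acc; simp [sweepRows]
  | cons row L ih =>
    intro cur acc
    simp only [List.foldl_cons, sweepRows, ih]
    simp

lemma sweepRows_length (n : Nat) (dc : Int) :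
    ∀ (L : List (List String)) (cur : List String), (sweepRows n dc cur L).length = L.length := by
  intro L
  induction L with
  | nil => intro cur; rfl
  | cons row L ih => intro cur; simp [sweepRows, ih]

lemma sweepRows_getD (R : List (List String)) (n : Nat) (dc : Int)
    (hdc : dc = 1 ∨ dc = -1 ∨ dc = 0) (hR : R.length = n) :
    ∀ (L : List (List String)) (r0 : Nat) (cur : List String),
      R.drop r0 = L → cur.length = n →
      (∀ c : Nat, c < n → cur.getD c "." = nxtU R n dc r0 (c : Int)) →
      ∀ (j c : Nat), j < L.length → c < n →
        ((sweepRows n dc cur L).getD j []).getD c "." = nxtU R n dc (r0 + j) (c : Int) := by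
  intro L
  induction L with
  | nil => intro r0 cur _ _ _ j c hj _; simp at hj
  | cons row L ih =>
    intro r0 cur hL hlen hcur j c hj hc
    have hr0 : r0 < n := by
      by_contra hcon
      rw [List.drop_eq_nil_of_le (by omega)] at hL
      simp at hL
    have hrow : R.drop r0 = R[r0]'(by omega) :: R.drop (r0 + 1) :=
      List.drop_eq_getElem_cons (by omega)
    rw [hrow] at hL
    injection hL with hL1 hL2
    have hRr0 : R.getD r0 [] = row := by rw [List.getD_eq_getElem _ _ (by omega)]; exact hL1
    cases j with
    | zero =>
      simpa [sweepRows] using hcur c hc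
    | succ j' =>
      have hn : 0 < n := by omega
      have hlen' : (pvSweepStep n dc cur row).length = n := pvSweepStep_length n dc hdc hn cur row
      have hcur' : ∀ c : Nat, c < n →
          (pvSweepStep n dc cur row).getD c "." = nxtU R n dc (r0 + 1) (c : Int) := by
        intro k hk
        unfold pvSweepStep
        rw [pvShift_getD dc hdc n _ (by simp) k hk]
        simp only [nxtU]
        by_cases hcb : 0 ≤ (k : Int) + dc ∧ (k : Int) + dc < (n : Int)
        · obtain ⟨m, hm⟩ : ∃ m : Nat, (k : Int) + dc = (m : Int) := ⟨((k : Int) + dc).toNat, by omega⟩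
          have hmn : m < n := by omega
          rw [if_pos hcb, if_pos hcb]
          rw [hRr0, show ((k : Int) + dc).toNat = m from by omega]
          rw [List.getD_eq_getElem _ _ (by simpa using hmn), List.getElem_map, List.getElem_range]
          show pvPhi (row.getD m "") (cur.getD m ".") = _
          rw [hcur m hmn, hm]
          unfold pvPhi
          rfl
        · rw [if_neg hcb, if_neg hcb]
      have hmain := ih (r0 + 1) (pvSweepStep n dc cur row) hL2 hlen' hcur' j' c
        (by simpa using hj) hc
      simp only [sweepRows, List.getD_cons_succ]
      rw [hmain]
      congr 1
      omega

lemma pvSweepUp_length (n : Nat) (dc : Int) (b : List (List String)) :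
    (pvSweepUp n dc b).length = b.length := by
  unfold pvSweepUp
  rw [sweep_fold]
  simp [sweepRows_length]

lemma pvSweepUp_getD (R : List (List String)) (n : Nat) (dc : Int)
    (hdc : dc = 1 ∨ dc = -1 ∨ dc = 0) (hR : R.length = n) (r c : Nat) (hr : r < n) (hc : c < n) :
    ((pvSweepUp n dc R).getD r []).getD c "." = nxtU R n dc r (c : Int) := by
  unfold pvSweepUp
  rw [sweep_fold]
  rw [List.nil_append]
  have := sweepRows_getD R n dc hdc hR R 0 (List.replicate n ".") (by simp) (by simp)
    (fun k hk => by rw [List.getD_replicate _ hk]; simp [nxtU]) r c (by omega) hc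
  simpa using this

lemma rowLeft_fold :
    ∀ (t : List String) (cur : String) (acc : List String),
      (t.foldl (fun (st : String × List String) s => (pvPhi s st.1, st.2 ++ [st.1])) (cur, acc)).2
      = acc ++ rowCells cur t := by
  intro t
  induction t with
  | nil => intro cur acc; simp [rowCells]
  | cons s t ih =>
    intro cur acc
    simp only [List.foldl_cons, rowCells, ih]
    simp

lemma rowCells_length : ∀ (t : List String) (cur : String), (rowCells cur t).length = t.length := by
  intro t
  induction t with
  | nil => intro cur; rfl
  | cons s t ih => intro cur; simp [rowCells, ih]

lemma pvRowLeft_length (row : List String) : (pvRowLeft row).length = row.length := by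
  unfold pvRowLeft
  rw [rowLeft_fold]
  simp [rowCells_length]

lemma rowCells_getD (row : List String) :
    ∀ (t : List String) (c0 : Nat) (cur : String),
      row.drop c0 = t → cur = nxtL row c0 →
      ∀ j : Nat, j < t.length → (rowCells cur t).getD j "." = nxtL row (c0 + j) := by
  intro t
  induction t with
  | nil => intro c0 cur _ _ j hj; simp at hj
  | cons s t ih =>
    intro c0 cur hL hcur j hj
    have hc0 : c0 < row.length := by
      by_contra hcon
      rw [List.drop_eq_nil_of_le (by omega)] at hL
      simp at hL
    have hrow : row.drop c0 = row[c0] :: row.drop (c0 + 1) := List.drop_eq_getElem_cons hc0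
    rw [hrow] at hL
    injection hL with hL1 hL2
    have hs : row.getD c0 "" = s := by rw [List.getD_eq_getElem _ _ hc0]; exact hL1
    cases j with
    | zero => simpa [rowCells] using hcur
    | succ j' =>
      have hcur' : pvPhi s cur = nxtL row (c0 + 1) := by
        simp only [nxtL, pvPhi, hs, hcur]
      have := ih (c0 + 1) (pvPhi s cur) hL2 hcur' j' (by simpa using hj)
      simp only [rowCells, List.getD_cons_succ]
      rw [this]
      congr 1
      omega

lemma pvRowLeft_getD (row : List String) (c : Nat) (hc : c < row.length) :
    (pvRowLeft row).getD c "." = nxtL row c := by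
  unfold pvRowLeft
  rw [rowLeft_fold, List.nil_append]
  have := rowCells_getD row row 0 "." (by simp) (by simp [nxtL]) c (by omega)
  simpa using this

lemma pvScanA_eq (board : List (List String)) (n : Int) (rival : String) (dr dc : Int)
    (fuel : Nat) (r c : Int) :
    pvScanA board n rival dr dc fuel r c =
      if 0 ≤ r ∧ r < n ∧ 0 ≤ c ∧ c < n then
        if pvSym board r c = rival then 1
        else if pvSym board r c ≠ "." then 0
        else
          match fuel with
          | 0 => 0
          | fuel' + 1 => pvScanA board n rival dr dc fuel' (r + dr) (c + dc)
      else 0 := by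
  rw [pvScanA.eq_def]

lemma scanUp (board : List (List String)) (hpre : Pre_is_valid_standoff board)
    (rival : String) (hriv : rival ≠ ".") (dc : Int) :
    ∀ (r0 : Nat) (c0 : Int) (fuel : Nat), r0 ≤ fuel → r0 ≤ board.length →
      pvScanA board (board.length : Int) rival (-1) dc fuel ((r0 : Int) - 1) (c0 + dc)
      = if nxtU (pvRows board) board.length dc r0 c0 = rival then 1 else 0 := by
  intro r0
  induction r0 with
  | zero =>
    intro c0 fuel _ _
    rw [pvScanA_eq, if_neg (by omega)]
    have hnx : nxtU (pvRows board) board.length dc 0 c0 = "." := rfl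
    rw [hnx, if_neg (fun h => hriv h.symm)]
  | succ r' ih =>
    intro c0 fuel hfuel hrn
    rw [pvScanA_eq]
    by_cases hcb : 0 ≤ c0 + dc ∧ c0 + dc < (board.length : Int)
    · rw [if_pos ⟨by omega, by omega, hcb.1, hcb.2⟩]
      obtain ⟨k, hk⟩ : ∃ k : Nat, c0 + dc = (k : Int) := ⟨(c0 + dc).toNat, by omega⟩
      have hkn : k < board.length := by omega
      rw [show ((r' + 1 : Nat) : Int) - 1 = (r' : Int) from by omega]
      rw [hk, pvSym_eq board hpre r' k (by omega) hkn]
      have hnx : nxtU (pvRows board) board.length dc (r' + 1) c0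
          = if ((pvRows board).getD r' []).getD k "" ≠ "." then
              ((pvRows board).getD r' []).getD k ""
            else nxtU (pvRows board) board.length dc r' ((k : Nat) : Int) := by
        simp only [nxtU]
        rw [if_pos hcb, show (c0 + dc).toNat = k from by omega, hk]
      rw [hnx]
      by_cases h2 : ((pvRows board).getD r' []).getD k "" = "."
      · have hsneq : ¬ ((pvRows board).getD r' []).getD k "" = rival := by
          rw [h2]; exact fun hh => hriv hh.symm
        rw [if_neg hsneq]
        rw [if_neg (show ¬ (((pvRows board).getD r' []).getD k "" ≠ ".") from fun hh => hh h2),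
          if_neg (show ¬ (((pvRows board).getD r' []).getD k "" ≠ ".") from fun hh => hh h2)]
        cases fuel with
        | zero => omega
        | succ f =>
          show pvScanA board (board.length : Int) rival (-1) dc f
              ((r' : Int) + -1) ((k : Int) + dc) = _
          rw [show ((r' : Int) + -1) = (r' : Int) - 1 from by ring]
          rw [ih ((k : Nat) : Int) f (by omega) (by omega)]
      · rw [if_pos h2, if_pos h2]
    · rw [if_neg (fun h => hcb ⟨h.2.2.1, h.2.2.2⟩)]
      have hnx : nxtU (pvRows board) board.length dc (r' + 1) c0 = "." := by
        simp only [nxtU]; rw [if_neg hcb]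
      rw [hnx, if_neg (fun h => hriv h.symm)]

lemma scanDown (board : List (List String)) (hpre : Pre_is_valid_standoff board)
    (rival : String) (hriv : rival ≠ ".") (dc : Int) :
    ∀ (m : Nat) (c0 : Int) (fuel : Nat), m ≤ fuel → m ≤ board.length →
      pvScanA board (board.length : Int) rival 1 dc fuel
        ((board.length : Int) - (m : Int)) (c0 + dc)
      = if nxtU (pvRows board).reverse board.length dc m c0 = rival then 1 else 0 := by
  intro m
  induction m with
  | zero =>
    intro c0 fuel _ _
    rw [pvScanA_eq, if_neg (by omega)]
    have hnx : nxtU (pvRows board).reverse board.length dc 0 c0 = "." := rfl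
    rw [hnx, if_neg (fun h => hriv h.symm)]
  | succ m' ih =>
    intro c0 fuel hfuel hmn
    rw [pvScanA_eq]
    by_cases hcb : 0 ≤ c0 + dc ∧ c0 + dc < (board.length : Int)
    · rw [if_pos ⟨by omega, by omega, hcb.1, hcb.2⟩]
      obtain ⟨k, hk⟩ : ∃ k : Nat, c0 + dc = (k : Int) := ⟨(c0 + dc).toNat, by omega⟩
      have hkn : k < board.length := by omega
      rw [show (board.length : Int) - ((m' + 1 : Nat) : Int)
          = ((board.length - (m' + 1) : Nat) : Int) from by omega]
      rw [hk, pvSym_eq board hpre (board.length - (m' + 1)) k (by omega) hkn]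
      have hnx : nxtU (pvRows board).reverse board.length dc (m' + 1) c0
          = if ((pvRows board).getD (board.length - (m' + 1)) []).getD k "" ≠ "." then
              ((pvRows board).getD (board.length - (m' + 1)) []).getD k ""
            else nxtU (pvRows board).reverse board.length dc m' ((k : Nat) : Int) := by
        simp only [nxtU]
        rw [if_pos hcb, show (c0 + dc).toNat = k from by omega, hk]
        rw [pvRevGetD (pvRows board) board.length m' (pvRows_length board) (by omega) []]
        rw [show board.length - 1 - m' = board.length - (m' + 1) from by omega]
      rw [hnx]
      by_cases h2 : ((pvRows board).getD (board.length - (m' + 1)) []).getD k "" = "."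
      · have hsneq : ¬ ((pvRows board).getD (board.length - (m' + 1)) []).getD k "" = rival := by
          rw [h2]; exact fun hh => hriv hh.symm
        rw [if_neg hsneq]
        rw [if_neg (show
            ¬ (((pvRows board).getD (board.length - (m' + 1)) []).getD k "" ≠ ".")
            from fun hh => hh h2),
          if_neg (show
            ¬ (((pvRows board).getD (board.length - (m' + 1)) []).getD k "" ≠ ".")
            from fun hh => hh h2)]
        cases fuel with
        | zero => omega
        | succ f =>
          show pvScanA board (board.length : Int) rival 1 dc f
              (((board.length - (m' + 1) : Nat) : Int) + 1) ((k : Int) + dc) = _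
          rw [show ((board.length - (m' + 1) : Nat) : Int) + 1
              = (board.length : Int) - (m' : Int) from by omega]
          rw [ih ((k : Nat) : Int) f (by omega) (by omega)]
      · rw [if_pos h2, if_pos h2]
    · rw [if_neg (fun h => hcb ⟨h.2.2.1, h.2.2.2⟩)]
      have hnx : nxtU (pvRows board).reverse board.length dc (m' + 1) c0 = "." := by
        simp only [nxtU]; rw [if_neg hcb]
      rw [hnx, if_neg (fun h => hriv h.symm)]

lemma scanLeft (board : List (List String)) (hpre : Pre_is_valid_standoff board)
    (rival : String) (hriv : rival ≠ ".") (r0 : Nat) (hr0 : r0 < board.length) :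
    ∀ (c0 fuel : Nat), c0 ≤ fuel → c0 ≤ board.length →
      pvScanA board (board.length : Int) rival 0 (-1) fuel (r0 : Int) ((c0 : Int) - 1)
      = if nxtL ((pvRows board).getD r0 []) c0 = rival then 1 else 0 := by
  intro c0
  induction c0 with
  | zero =>
    intro fuel _ _
    rw [pvScanA_eq, if_neg (by omega)]
    have hnx : nxtL ((pvRows board).getD r0 []) 0 = "." := rfl
    rw [hnx, if_neg (fun h => hriv h.symm)]
  | succ c' ih =>
    intro fuel hfuel hcn
    rw [pvScanA_eq]
    rw [show ((c' + 1 : Nat) : Int) - 1 = (c' : Int) from by omega]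
    rw [if_pos ⟨by omega, by omega, by omega, by omega⟩]
    rw [pvSym_eq board hpre r0 c' hr0 (by omega)]
    have hnx : nxtL ((pvRows board).getD r0 []) (c' + 1)
        = if ((pvRows board).getD r0 []).getD c' "" ≠ "." then
            ((pvRows board).getD r0 []).getD c' ""
          else nxtL ((pvRows board).getD r0 []) c' := rfl
    rw [hnx]
    by_cases h2 : ((pvRows board).getD r0 []).getD c' "" = "."
    · have hsneq : ¬ ((pvRows board).getD r0 []).getD c' "" = rival := by
        rw [h2]; exact fun hh => hriv hh.symm
      rw [if_neg hsneq]
      rw [if_neg (show ¬ (((pvRows board).getD r0 []).getD c' "" ≠ ".") from fun hh => hh h2),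
        if_neg (show ¬ (((pvRows board).getD r0 []).getD c' "" ≠ ".") from fun hh => hh h2)]
      cases fuel with
      | zero => omega
      | succ f =>
        show pvScanA board (board.length : Int) rival 0 (-1) f
            ((r0 : Int) + 0) ((c' : Int) + -1) = _
        rw [show ((r0 : Int) + 0) = (r0 : Int) from by ring]
        rw [show ((c' : Int) + -1) = (c' : Int) - 1 from by ring]
        rw [ih f (by omega) (by omega)]
    · rw [if_pos h2, if_pos h2]

lemma scanRight (board : List (List String)) (hpre : Pre_is_valid_standoff board)
    (rival : String) (hriv : rival ≠ ".") (r0 : Nat) (hr0 : r0 < board.length) :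
    ∀ (m fuel : Nat), m ≤ fuel → m ≤ board.length →
      pvScanA board (board.length : Int) rival 0 1 fuel (r0 : Int)
        ((board.length : Int) - (m : Int))
      = if nxtL ((pvRows board).getD r0 []).reverse m = rival then 1 else 0 := by
  intro m
  induction m with
  | zero =>
    intro fuel _ _
    rw [pvScanA_eq, if_neg (by omega)]
    have hnx : nxtL ((pvRows board).getD r0 []).reverse 0 = "." := rfl
    rw [hnx, if_neg (fun h => hriv h.symm)]
  | succ m' ih =>
    intro fuel hfuel hmn
    rw [pvScanA_eq]
    rw [show (board.length : Int) - ((m' + 1 : Nat) : Int)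
        = ((board.length - (m' + 1) : Nat) : Int) from by omega]
    rw [if_pos ⟨by omega, by omega, by omega, by omega⟩]
    rw [pvSym_eq board hpre r0 (board.length - (m' + 1)) hr0 (by omega)]
    have hnx : nxtL ((pvRows board).getD r0 []).reverse (m' + 1)
        = if ((pvRows board).getD r0 []).getD (board.length - (m' + 1)) "" ≠ "." then
            ((pvRows board).getD r0 []).getD (board.length - (m' + 1)) ""
          else nxtL ((pvRows board).getD r0 []).reverse m' := by
      simp only [nxtL]
      rw [pvRevGetD ((pvRows board).getD r0 []) board.length m'
        (pvRows_row_length board hpre r0 hr0) (by omega) ""]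
      rw [show board.length - 1 - m' = board.length - (m' + 1) from by omega]
    rw [hnx]
    by_cases h2 : ((pvRows board).getD r0 []).getD (board.length - (m' + 1)) "" = "."
    · have hsneq : ¬ ((pvRows board).getD r0 []).getD (board.length - (m' + 1)) "" = rival := by
        rw [h2]; exact fun hh => hriv hh.symm
      rw [if_neg hsneq]
      rw [if_neg (show
          ¬ (((pvRows board).getD r0 []).getD (board.length - (m' + 1)) "" ≠ ".")
          from fun hh => hh h2),
        if_neg (show
          ¬ (((pvRows board).getD r0 []).getD (board.length - (m' + 1)) "" ≠ ".")
          from fun hh => hh h2)]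
      cases fuel with
      | zero => omega
      | succ f =>
        show pvScanA board (board.length : Int) rival 0 1 f
            ((r0 : Int) + 0) (((board.length - (m' + 1) : Nat) : Int) + 1) = _
        rw [show ((r0 : Int) + 0) = (r0 : Int) from by ring]
        rw [show ((board.length - (m' + 1) : Nat) : Int) + 1
            = (board.length : Int) - (m' : Int) from by omega]
        rw [ih f (by omega) (by omega)]
    · rw [if_pos h2, if_pos h2]

lemma count_eq (board : List (List String)) (hpre : Pre_is_valid_standoff board)
    (gang : String) (hg : gang = "B" ∨ gang = "C") (r0 c0 : Nat)
    (hr0 : r0 < board.length) (hc0 : c0 < board.length) :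
    pvCountRivals board (board.length : Int) (r0 : Int) (c0 : Int) gang
    = (pvGrids board.length (pvRows board)).foldl
        (fun (acc : Int) g => acc +
          (if (g.getD r0 []).getD c0 "." = (if gang = "C" then "B" else "C") then 1 else 0))
        0 := by
  have hriv : (if gang = "C" then "B" else "C") ≠ "." := by
    rcases hg with h | h <;> subst h <;> simp
  have hdc1 : (1 : Int) = 1 ∨ (1 : Int) = -1 ∨ (1 : Int) = 0 := Or.inl rfl
  have hdcm : (-1 : Int) = 1 ∨ (-1 : Int) = -1 ∨ (-1 : Int) = 0 := Or.inr (Or.inl rfl)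
  have hdc0 : (0 : Int) = 1 ∨ (0 : Int) = -1 ∨ (0 : Int) = 0 := Or.inr (Or.inr rfl)
  have hrevlen : ((pvRows board).reverse).length = board.length := by
    simp [pvRows_length]
  have hsul : ∀ dc' : Int, (pvSweepUp board.length dc' ((pvRows board).reverse)).length
      = board.length := by
    intro dc'; rw [pvSweepUp_length]; exact hrevlen
  unfold pvCountRivals pvGrids
  simp only [List.foldl_cons, List.foldl_nil]
  rw [show ((board.length : Int)).toNat = board.length from by omega]
  -- row coordinates into the shapes the scan lemmas use
  rw [show ((r0 : Int) + -1) = (r0 : Int) - 1 from by ring]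
  rw [show ((r0 : Int) + 1) = (board.length : Int) - ((board.length - 1 - r0 : Nat) : Int)
      from by omega]
  rw [show ((r0 : Int) + 0) = (r0 : Int) from by ring]
  -- the eight ray walks of A
  rw [scanUp board hpre _ hriv 0 r0 (c0 : Int) board.length (by omega) (by omega)]
  rw [scanUp board hpre _ hriv (-1) r0 (c0 : Int) board.length (by omega) (by omega)]
  rw [scanUp board hpre _ hriv 1 r0 (c0 : Int) board.length (by omega) (by omega)]
  rw [scanDown board hpre _ hriv 0 (board.length - 1 - r0) (c0 : Int) board.length
    (by omega) (by omega)]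
  rw [scanDown board hpre _ hriv (-1) (board.length - 1 - r0) (c0 : Int) board.length
    (by omega) (by omega)]
  rw [scanDown board hpre _ hriv 1 (board.length - 1 - r0) (c0 : Int) board.length
    (by omega) (by omega)]
  rw [show ((c0 : Int) + -1) = (c0 : Int) - 1 from by ring]
  rw [show ((c0 : Int) + 1) = (board.length : Int) - ((board.length - 1 - c0 : Nat) : Int)
      from by omega]
  rw [scanLeft board hpre _ hriv r0 hr0 c0 board.length (by omega) (by omega)]
  rw [scanRight board hpre _ hriv r0 hr0 (board.length - 1 - c0) board.length
    (by omega) (by omega)]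
  -- the eight precomputed grids of B
  rw [pvSweepUp_getD (pvRows board) board.length 0 hdc0 (pvRows_length board) r0 c0 hr0 hc0]
  rw [pvSweepUp_getD (pvRows board) board.length (-1) hdcm (pvRows_length board) r0 c0 hr0 hc0]
  rw [pvSweepUp_getD (pvRows board) board.length 1 hdc1 (pvRows_length board) r0 c0 hr0 hc0]
  rw [pvRevGetD (pvSweepUp board.length 0 ((pvRows board).reverse)) board.length r0
    (hsul 0) hr0 []]
  rw [pvRevGetD (pvSweepUp board.length (-1) ((pvRows board).reverse)) board.length r0
    (hsul (-1)) hr0 []]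
  rw [pvRevGetD (pvSweepUp board.length 1 ((pvRows board).reverse)) board.length r0
    (hsul 1) hr0 []]
  rw [pvSweepUp_getD ((pvRows board).reverse) board.length 0 hdc0 hrevlen
    (board.length - 1 - r0) c0 (by omega) hc0]
  rw [pvSweepUp_getD ((pvRows board).reverse) board.length (-1) hdcm hrevlen
    (board.length - 1 - r0) c0 (by omega) hc0]
  rw [pvSweepUp_getD ((pvRows board).reverse) board.length 1 hdc1 hrevlen
    (board.length - 1 - r0) c0 (by omega) hc0]
  rw [pvMapGetD pvRowLeft (pvRows board) r0 (by rw [pvRows_length]; exact hr0) [] []]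
  rw [pvRowLeft_getD ((pvRows board).getD r0 [])
    c0 (by rw [pvRows_row_length board hpre r0 hr0]; exact hc0)]
  rw [pvMapGetD (fun r => (pvRowLeft r.reverse).reverse) (pvRows board) r0
    (by rw [pvRows_length]; exact hr0) [] []]
  rw [pvRevGetD (pvRowLeft ((pvRows board).getD r0 []).reverse) board.length c0
    (by rw [pvRowLeft_length, List.length_reverse, pvRows_row_length board hpre r0 hr0]) hc0 "."]
  rw [pvRowLeft_getD ((pvRows board).getD r0 []).reverse (board.length - 1 - c0)
    (by rw [List.length_reverse, pvRows_row_length board hpre r0 hr0]; omega)]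
  ring

theorem is_valid_standoff_spec : Claim_equal_is_valid_standoff := by
  intro board _ hpre
  unfold Spec_is_valid_standoff
  show is_valid_standoff board = is_valid_standoff_alt board
  simp only [is_valid_standoff, is_valid_standoff_alt]
  rw [PySem.List.pyRange_zero_natCast]
  rw [List.all_map]
  apply pvAllCongr
  intro r hr
  have hrn : r < board.length := List.mem_range.mp hr
  simp only [Function.comp]
  rw [List.all_map]
  apply pvAllCongr
  intro c hc
  have hcn : c < board.length := List.mem_range.mp hc
  simp only [Function.comp]
  rw [pvSym_eq board hpre r c hrn hcn]
  by_cases hgun : ((pvRows board).getD r []).getD c "" = "B" ∨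
      ((pvRows board).getD r []).getD c "" = "C"
  · rw [if_pos hgun, if_pos hgun, count_eq board hpre _ hgun r c hrn hcn]
  · rw [if_neg hgun, if_neg hgun]
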